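-- pv_equiv track=rewrite | github.com/jonasz-lazar-pwr/iris-classification | src/analysis/converter.py | _flatten_confusion_matrix
-- ===== SOURCE A (Python) =====
-- from typing import Dict, List
--
-- def _flatten_confusion_matrix(cm: List[List[int]]) -> Dict:
--     """Flatten confusion matrix to individual columns."""
--     if not cm:
--         return {}
--
--     flat = {}
--     class_names = ["setosa", "versicolor", "virginica"]
--
--     for i, true_class in enumerate(class_names):
--         for j, pred_class in enumerate(class_names):
--             key = f"cm_{true_class}_{pred_class}"
--             flat[key] = cm[i][j] if i < len(cm) and j < len(cm[i]) else 0
--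
--     return flat
-- ===== SOURCE B (Python) =====
-- from typing import Dict, List
--
-- def _flatten_confusion_matrix(cm: List[List[int]]) -> Dict:
--     """Flatten confusion matrix to individual columns."""
--     if not cm:
--         return {}
--
--     class_names = ["setosa", "versicolor", "virginica"]
--     padded = [(row + [0, 0, 0])[:3] for row in (cm + [[], [], []])[:3]]
--     values = [v for row in padded for v in row]
--     keys = [f"cm_{t}_{p}" for t in class_names for p in class_names]
--     return dict(zip(keys, values))
-- ===== Notes on version B (the rewrite author's own statement) =====
-- stated objective: alternative
-- what changed: A fills each of the nine keys with a per-cell bounds check inside a 3x3 loop over class names; B instead normalizes the matrix to exactly 3x3 by padding/truncating rows and columns, flattens it to a nine-value list, and builds the dict in one shot via dict(zip(keys, values)) with no bounds checks and no dict mutation.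
import Mathlib
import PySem

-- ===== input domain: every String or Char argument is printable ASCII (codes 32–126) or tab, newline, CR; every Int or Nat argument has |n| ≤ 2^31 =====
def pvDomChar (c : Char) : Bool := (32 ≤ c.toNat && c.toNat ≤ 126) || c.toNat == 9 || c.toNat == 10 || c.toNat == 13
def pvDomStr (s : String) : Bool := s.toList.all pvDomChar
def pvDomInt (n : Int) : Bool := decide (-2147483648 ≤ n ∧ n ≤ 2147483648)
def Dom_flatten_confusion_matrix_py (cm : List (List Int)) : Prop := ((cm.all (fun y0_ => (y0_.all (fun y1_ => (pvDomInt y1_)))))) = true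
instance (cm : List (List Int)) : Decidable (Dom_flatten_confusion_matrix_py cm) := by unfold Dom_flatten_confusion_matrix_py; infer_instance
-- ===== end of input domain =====

-- B keeps the empty guard but replaces A's per-cell bounds-checked 3×3 key loop by: pad/truncate the matrix to exactly 3×3, flatten it to nine values, and build the dict in one shot as dict(zip(keys, values)) (objective: alternative decomposition, same result).

-- ===== PORT A =====
-- literal port of A: empty guard, then a 3×3 loop over enumerate(class_names) inserting each key
-- with a per-cell bounds check on cm
def flatten_confusion_matrix_py (cm : List (List Int)) : List (String × Int) :=
  if cm = [] then [] else
  let class_names : List String := ["setosa", "versicolor", "virginica"]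
  let flat : PySem.Dict String Int :=
    (PySem.List.enumerate class_names).foldl (fun flat ip =>
      (PySem.List.enumerate class_names).foldl (fun flat jp =>
        flat.insert ("cm_" ++ ip.2 ++ "_" ++ jp.2)
          (if ip.1 < PySem.List.len cm ∧ jp.1 < PySem.List.len (PySem.List.pyGetD cm ip.1 []) then
            PySem.List.pyGetD (PySem.List.pyGetD cm ip.1 []) jp.1 0
          else 0)) flat) PySem.Dict.empty
  flat.items

-- ===== PORT B =====
-- literal port of B: empty guard; pad/truncate to exactly 3×3 via (cm+[[],[],[]])[:3] and
-- (row+[0,0,0])[:3]; flatten; dict(zip(keys, values))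
def flatten_confusion_matrix_py_alt (cm : List (List Int)) : List (String × Int) :=
  if cm = [] then [] else
  let class_names : List String := ["setosa", "versicolor", "virginica"]
  let padded : List (List Int) :=
    (PySem.List.slice (cm ++ [[], [], []]) none (some 3)).map
      (fun row => PySem.List.slice (row ++ [0, 0, 0]) none (some 3))
  let values : List Int := padded.flatMap (fun row => row)
  let keys : List String :=
    class_names.flatMap (fun t => class_names.map (fun p => "cm_" ++ t ++ "_" ++ p))
  (PySem.Dict.ofList (keys.zip values)).items

-- ===== PRECONDITION & SPEC =====
def Spec_flatten_confusion_matrix_py (cm : List (List Int)) (out : List (String × Int)) : Prop := out = flatten_confusion_matrix_py_alt cm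
instance (cm : List (List Int)) (out : List (String × Int)) : Decidable (Spec_flatten_confusion_matrix_py cm out) := by unfold Spec_flatten_confusion_matrix_py; infer_instance

-- ===== CLAIM (what is proved, stated in full; the proofs are below) =====
def Claim_equal_flatten_confusion_matrix_py : Prop := ∀ (cm : List (List Int)), Dom_flatten_confusion_matrix_py cm → Spec_flatten_confusion_matrix_py cm (flatten_confusion_matrix_py cm)

-- ===== LEMMAS AND PROOFS =====

def pvCell (cm : List (List Int)) (i j : Int) : Int :=
  if i < PySem.List.len cm ∧ j < PySem.List.len (PySem.List.pyGetD cm i []) then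
    PySem.List.pyGetD (PySem.List.pyGetD cm i []) j 0 else 0

def pvNine (cm : List (List Int)) : List (String × Int) :=
  [("cm_setosa_setosa", pvCell cm 0 0), ("cm_setosa_versicolor", pvCell cm 0 1),
   ("cm_setosa_virginica", pvCell cm 0 2), ("cm_versicolor_setosa", pvCell cm 1 0),
   ("cm_versicolor_versicolor", pvCell cm 1 1), ("cm_versicolor_virginica", pvCell cm 1 2),
   ("cm_virginica_setosa", pvCell cm 2 0), ("cm_virginica_versicolor", pvCell cm 2 1),
   ("cm_virginica_virginica", pvCell cm 2 2)]

set_option maxHeartbeats 2000000 in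
lemma pvA_char (r : List Int) (rest : List (List Int)) :
    flatten_confusion_matrix_py (r :: rest) = pvNine (r :: rest) := rfl

-- a padded/truncated row is exactly the first three getD-values
lemma pvPadRow (r : List Int) :
    PySem.List.slice (r ++ [0, 0, 0]) none (some 3) = [r.getD 0 0, r.getD 1 0, r.getD 2 0] := by
  rw [PySem.List.slice_to _ (by norm_num)]
  match r with
  | [] => rfl
  | [a] => rfl
  | [a, b] => rfl
  | a :: b :: c :: t => simp [List.getD]

lemma pvPadRows (cm : List (List Int)) :
    PySem.List.slice (cm ++ [[], [], []]) none (some 3) =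
      [cm.getD 0 [], cm.getD 1 [], cm.getD 2 []] := by
  rw [PySem.List.slice_to _ (by norm_num)]
  match cm with
  | [] => rfl
  | [a] => rfl
  | [a, b] => rfl
  | a :: b :: c :: t => simp [List.getD]

-- the bounds-checked cell of A is the padded getD-cell of B
lemma pvCell_getD (cm : List (List Int)) (i j : Int) (hi : 0 ≤ i) (hj : 0 ≤ j) :
    pvCell cm i j = (cm.getD i.toNat []).getD j.toNat 0 := by
  unfold pvCell
  rw [PySem.List.pyGetD_of_nonneg _ _ hi, PySem.List.pyGetD_of_nonneg _ _ hj]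
  simp only [PySem.List.len_eq]
  split_ifs with h
  · rfl
  · rcases not_and_or.mp h with h1 | h2
    · rw [List.getD_eq_default cm _ (by omega)]
      simp [List.getD]
    · rw [List.getD_eq_default _ _ (by omega)]

-- dict(zip(keys, ·)) over the nine distinct constant keys lists exactly the nine pairs
set_option maxHeartbeats 2000000 in
lemma pvDictItems (v0 v1 v2 v3 v4 v5 v6 v7 v8 : Int) :
    (PySem.Dict.ofList
      ((["cm_setosa_setosa", "cm_setosa_versicolor", "cm_setosa_virginica",
         "cm_versicolor_setosa", "cm_versicolor_versicolor", "cm_versicolor_virginica",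
         "cm_virginica_setosa", "cm_virginica_versicolor", "cm_virginica_virginica"].zip
        [v0, v1, v2, v3, v4, v5, v6, v7, v8]) : List (String × Int))).items =
    [("cm_setosa_setosa", v0), ("cm_setosa_versicolor", v1), ("cm_setosa_virginica", v2),
     ("cm_versicolor_setosa", v3), ("cm_versicolor_versicolor", v4), ("cm_versicolor_virginica", v5),
     ("cm_virginica_setosa", v6), ("cm_virginica_versicolor", v7), ("cm_virginica_virginica", v8)] := rfl

set_option maxHeartbeats 2000000 in
lemma pvB_char (r : List Int) (rest : List (List Int)) :
    flatten_confusion_matrix_py_alt (r :: rest) = pvNine (r :: rest) := by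
  show (PySem.Dict.ofList _).items = _
  rw [pvPadRows]
  simp only [List.map_cons, List.map_nil, pvPadRow, List.flatMap_cons, List.flatMap_nil,
    List.append_nil, List.cons_append, List.nil_append]
  rw [show ("cm_" ++ "setosa" ++ "_" ++ "setosa" : String) = "cm_setosa_setosa" from rfl,
    show ("cm_" ++ "setosa" ++ "_" ++ "versicolor" : String) = "cm_setosa_versicolor" from rfl,
    show ("cm_" ++ "setosa" ++ "_" ++ "virginica" : String) = "cm_setosa_virginica" from rfl,
    show ("cm_" ++ "versicolor" ++ "_" ++ "setosa" : String) = "cm_versicolor_setosa" from rfl,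
    show ("cm_" ++ "versicolor" ++ "_" ++ "versicolor" : String) = "cm_versicolor_versicolor" from rfl,
    show ("cm_" ++ "versicolor" ++ "_" ++ "virginica" : String) = "cm_versicolor_virginica" from rfl,
    show ("cm_" ++ "virginica" ++ "_" ++ "setosa" : String) = "cm_virginica_setosa" from rfl,
    show ("cm_" ++ "virginica" ++ "_" ++ "versicolor" : String) = "cm_virginica_versicolor" from rfl,
    show ("cm_" ++ "virginica" ++ "_" ++ "virginica" : String) = "cm_virginica_virginica" from rfl]
  rw [pvDictItems]
  unfold pvNine
  rw [pvCell_getD _ 0 0 (by norm_num) (by norm_num), pvCell_getD _ 0 1 (by norm_num) (by norm_num),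
    pvCell_getD _ 0 2 (by norm_num) (by norm_num), pvCell_getD _ 1 0 (by norm_num) (by norm_num),
    pvCell_getD _ 1 1 (by norm_num) (by norm_num), pvCell_getD _ 1 2 (by norm_num) (by norm_num),
    pvCell_getD _ 2 0 (by norm_num) (by norm_num), pvCell_getD _ 2 1 (by norm_num) (by norm_num),
    pvCell_getD _ 2 2 (by norm_num) (by norm_num)]
  rfl

-- ===== VERDICT (by name: the statement is the Claim_ definition above) =====
theorem flatten_confusion_matrix_py_spec : Claim_equal_flatten_confusion_matrix_py := by
  unfold Claim_equal_flatten_confusion_matrix_py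
  intro cm _
  unfold Spec_flatten_confusion_matrix_py
  cases cm with
  | nil => rfl
  | cons r rest => rw [pvA_char, pvB_char]
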